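-- pv_equiv track=rewrite | github.com/PalthyaGopalNaik/Hansa | Problem1.py | f
-- ===== SOURCE A (Python) =====
-- def f(stri):
--   mystr = str(stri)
--   prev = ""
--   for i in range(len(stri)):
--     cur = mystr[i]
--     if cur >= 'a' or cur <='z' and cur >= 'A' or cur <='Z' and cur >= "0" and cur <= "9" or cur == " ":
--       if prev in " " and cur in {'a','e','i','o','u','A','E','I','O','U'}:
--         mystr = mystr[:i] + "$" + mystr[i+1:]
--       if prev == "0" and cur in {0,1,2,3,4,5,6,7,8,9}:
--         mystr = mystr[:i] + "1" + mystr[i+1:]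
--       if prev== cur in {0,1,2,3,4,5,6,7,8,9} :
--         mystr = mystr[:i] + "0" +mystr[i+1:]
--
--     else:
--       return "Not an Alphanumeric statement"
--     prev = cur
--   return mystr
-- ===== SOURCE B (Python) =====
-- def f(stri):
--     s = str(stri)
--     # validation pass: A's messy condition simplifies to: space, digit, or code >= 'A'
--     if not all(c == ' ' or c >= 'A' or '0' <= c <= '9' for c in s):
--         return "Not an Alphanumeric statement"
--     # transformation pass: vowel at start or after a space becomes '$'
--     out = []
--     prev = ""
--     for c in s:
--         out.append('$' if prev in ("", " ") and c in "aeiouAEIOU" else c)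
--         prev = c
--     return "".join(out)
-- ===== Notes on version B (the rewrite author's own statement) =====
-- stated objective: simpler
-- what changed: B replaces A's single interleaved loop that splices the string at each edit (and carries two dead int-set branches) with two sequential passes: a validation scan using the simplified character class (space, digit, or code at least that of the letter A, equivalent to A's precedence-mangled condition), then a transformation pass appending the marker or the original char to an accumulator joined once.
import Mathlib
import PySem

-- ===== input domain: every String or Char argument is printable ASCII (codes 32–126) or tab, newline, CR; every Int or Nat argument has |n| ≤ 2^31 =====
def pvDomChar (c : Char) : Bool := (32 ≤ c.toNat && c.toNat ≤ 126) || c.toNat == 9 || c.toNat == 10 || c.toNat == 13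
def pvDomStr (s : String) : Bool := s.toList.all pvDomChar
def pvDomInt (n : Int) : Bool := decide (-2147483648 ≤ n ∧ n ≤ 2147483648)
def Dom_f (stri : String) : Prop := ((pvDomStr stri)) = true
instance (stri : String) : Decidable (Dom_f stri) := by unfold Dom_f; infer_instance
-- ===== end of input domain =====

-- B separates A's interleaved validation/edit loop into a validation pass plus a
-- transformation pass building the output once (objective: simpler).

-- ===== PORT A =====
-- loop body over range(len(stri)); mystr is the mutable string, prev the previous char
-- (as a string: "" initially, then single-char strings, exactly as in Python).
-- 'mystr[i]' : i is always in range (edits keep the length), so getD never hits its default.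
-- 'mystr[:i] + "$" + mystr[i+1:]' with 0 ≤ i is take i / drop (i+1), exact here.
-- The two ifs 'prev == "0" and cur in {0,…,9}' and 'prev == cur in {0,…,9}' compare the
-- one-char string cur with an int set, which is always False in Python: no-op branches.
def fGo (mystr : List Char) (prev : String) : List Nat → String
  | [] => String.ofList mystr
  | i :: rest =>
    let cur : Char := (mystr[i]?).getD ' '
    if 'a' ≤ cur ∨ (cur ≤ 'z' ∧ 'A' ≤ cur) ∨ (cur ≤ 'Z' ∧ '0' ≤ cur ∧ cur ≤ '9') ∨ cur = ' ' then
      let mystr :=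
        if (prev = "" ∨ prev = " ") ∧ cur ∈ ['a','e','i','o','u','A','E','I','O','U'] then
          mystr.take i ++ '$' :: mystr.drop (i+1)
        else mystr
      fGo mystr cur.toString rest
    else "Not an Alphanumeric statement"

def f (stri : String) : String :=
  fGo stri.toList "" (List.range stri.toList.length)  -- range(len(stri))

-- ===== PORT B =====
-- validation predicate: c == ' ' or c >= 'A' or '0' <= c <= '9'
def validB (c : Char) : Bool :=
  c == ' ' || decide ('A' ≤ c) || (decide ('0' ≤ c) && decide (c ≤ '9'))

-- second pass: build the output characters, tracking prev
def bGo (prev : String) : List Char → List Char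
  | [] => []
  | c :: rest =>
    (if (prev = "" ∨ prev = " ") ∧ c ∈ ['a','e','i','o','u','A','E','I','O','U'] then '$' else c) :: bGo c.toString rest

def f_alt (stri : String) : String :=
  let s := stri.toList
  if s.all validB then String.ofList (bGo "" s)
  else "Not an Alphanumeric statement"

-- ===== PRECONDITION & SPEC =====
def Spec_f (stri : String) (out : String) : Prop := out = f_alt stri
instance (stri : String) (out : String) : Decidable (Spec_f stri out) := by unfold Spec_f; infer_instance

-- ===== CLAIM (what is proved, stated in full; the proofs are below) =====
def Claim_equal_f : Prop := ∀ (stri : String), Dom_f stri → Spec_f stri (f stri)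

-- ===== LEMMAS AND PROOFS =====

-- A's condition and B's validation predicate agree on every character
theorem validA_eq_validB (c : Char) :
    ('a' ≤ c ∨ (c ≤ 'z' ∧ 'A' ≤ c) ∨ (c ≤ 'Z' ∧ '0' ≤ c ∧ c ≤ '9') ∨ c = ' ') ↔ validB c = true := by
  unfold validB
  simp only [Bool.or_eq_true, Bool.and_eq_true, beq_iff_eq, decide_eq_true_eq,
    Char.ext_iff, Char.le_def, UInt32.le_iff_toNat_le, ← UInt32.toNat_inj]
  have h97 : ('a'.val).toNat = 97 := by decide
  have h122 : ('z'.val).toNat = 122 := by decide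
  have h65 : ('A'.val).toNat = 65 := by decide
  have h90 : ('Z'.val).toNat = 90 := by decide
  have h48 : ('0'.val).toNat = 48 := by decide
  have h57 : ('9'.val).toNat = 57 := by decide
  have h32 : (' '.val).toNat = 32 := by decide
  omega

theorem fGo_eq_bGo (rest done : List Char) (prev : String) :
    fGo (done ++ rest) prev (List.range' done.length rest.length) =
      if rest.all validB then String.ofList (done ++ bGo prev rest)
      else "Not an Alphanumeric statement" := by
  induction rest generalizing done prev with
  | nil => simp [fGo, bGo]
  | cons c cs ih =>
    show fGo (done ++ c :: cs) prev (List.range' done.length (cs.length + 1)) = _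
    rw [List.range'_succ, fGo]
    have hcur : ((done ++ c :: cs)[done.length]?).getD ' ' = c := by
      simp
    rw [hcur]
    by_cases hv : ('a' ≤ c ∨ (c ≤ 'z' ∧ 'A' ≤ c) ∨ (c ≤ 'Z' ∧ '0' ≤ c ∧ c ≤ '9') ∨ c = ' ')
    · rw [if_pos hv]
      have hvB : validB c = true := (validA_eq_validB c).mp hv
      set c' : Char := if (prev = "" ∨ prev = " ") ∧ c ∈ ['a','e','i','o','u','A','E','I','O','U'] then '$' else c with hc'
      have hsplice :
          (if (prev = "" ∨ prev = " ") ∧ c ∈ ['a','e','i','o','u','A','E','I','O','U'] then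
            (done ++ c :: cs).take done.length ++ '$' :: (done ++ c :: cs).drop (done.length + 1)
          else done ++ c :: cs) = (done ++ [c']) ++ cs := by
        rw [hc']
        split
        · have h1 : (done ++ c :: cs).take done.length = done := by simp
          have h2 : (done ++ c :: cs).drop (done.length + 1) = cs := by
            have : done ++ c :: cs = (done ++ [c]) ++ cs := by simp
            rw [this]
            have hl : (done ++ [c]).length = done.length + 1 := by simp
            rw [← hl, List.drop_left]
          simp [h1, h2]
        · simp
      rw [hsplice]
      have hlen : done.length + 1 = (done ++ [c']).length := by simp
      rw [hlen, ih (done ++ [c']) c.toString]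
      by_cases hall : cs.all validB = true
      · simp only [List.all_cons, hvB, hall, Bool.and_self, if_pos, bGo]
        congr 1
        rw [hc']
        split <;> simp
      · simp [List.all_cons, hvB, hall]
    · rw [if_neg hv]
      have hvB : validB c = false := by
        rcases h : validB c with _ | _
        · rfl
        · exact absurd ((validA_eq_validB c).mpr h) hv
      simp [List.all_cons, hvB]

-- ===== VERDICT (by name: the statement is the Claim_ definition above) =====
theorem f_spec : Claim_equal_f := by
  intro stri _
  unfold Spec_f f f_alt
  have := fGo_eq_bGo stri.toList [] ""
  simpa [List.range_eq_range'] using this
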